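-- pv_equiv track=rewrite | github.com/posl/comment_recommendation | script/mod_gen/2_time/zh/195_D/0.py | solve
-- ===== SOURCE A (Python) =====
-- def solve(n, m, q, w, v, x, l, r):
--     ans = 0
--     for i in range(1, 2**n):
--         if bin(i).count('1') != m:
--             continue
--         weight = 0
--         value = 0
--         for j in range(n):
--             if i & (1 << j):
--                 weight += w[j]
--                 value += v[j]
--         for j in range(m):
--             if x[j] >= weight and l <= j+1 and j+1 <= r:
--                 ans = max(ans, value)
--     return ans
-- ===== SOURCE B (Python) =====
-- def solve(n, m, q, w, v, x, l, r):
--     # No subset of exactly m items exists (m<1 also covers A's skipped empty mask).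
--     if m < 1 or m > n:
--         return 0
--     # Positions j (0-based) eligible in A's inner loop: lo <= j < hi.
--     lo = max(0, l - 1)
--     hi = min(m, r)
--     if hi <= lo:
--         return 0
--     # A subset qualifies iff its weight is at most the best threshold in the window.
--     t = max(x[lo:hi])
--
--     def go(j, k, weight, value):
--         # best achievable value choosing k more items from w[j:], 0 if none qualifies
--         if k == 0:
--             return value if weight <= t else 0
--         if n - j < k:
--             return 0
--         return max(go(j + 1, k - 1, weight + w[j], value + v[j]),
--                    go(j + 1, k, weight, value))
--
--     return go(0, m, 0, 0)
-- ===== Notes on version B (the rewrite author's own statement) =====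
-- stated objective: alternative
-- what changed: Instead of scanning all 2^n bitmasks and re-running the m-position query loop for every mask, B precomputes once the single weight threshold (max of x over the eligible l..r window) and enumerates exactly-m-item choices by a pruned include/exclude recursion over the items.
import Mathlib
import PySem

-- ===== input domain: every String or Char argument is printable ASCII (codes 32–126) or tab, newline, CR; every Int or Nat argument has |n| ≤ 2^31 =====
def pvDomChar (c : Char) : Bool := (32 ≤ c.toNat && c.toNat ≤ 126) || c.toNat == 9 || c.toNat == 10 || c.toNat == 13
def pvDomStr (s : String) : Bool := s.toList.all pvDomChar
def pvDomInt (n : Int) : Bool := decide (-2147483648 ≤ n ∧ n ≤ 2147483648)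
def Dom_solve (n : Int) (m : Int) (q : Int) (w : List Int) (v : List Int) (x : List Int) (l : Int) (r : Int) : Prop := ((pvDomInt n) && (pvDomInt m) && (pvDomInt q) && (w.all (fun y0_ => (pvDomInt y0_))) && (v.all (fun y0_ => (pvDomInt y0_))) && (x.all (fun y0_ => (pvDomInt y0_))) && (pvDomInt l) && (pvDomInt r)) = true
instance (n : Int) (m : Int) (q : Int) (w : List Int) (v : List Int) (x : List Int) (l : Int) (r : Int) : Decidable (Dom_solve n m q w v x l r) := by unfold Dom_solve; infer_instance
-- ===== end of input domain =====

-- B replaces A's scan of all 2^n bitmasks (with a fresh m-position query loop per mask)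
-- by one precomputed weight threshold and a pruned include/exclude recursion over the items.

-- ===== PORT A =====
-- literal port of Source A; `2**n` is 2^n.toNat (exact for n ≥ 0, which Pre_ states), `1 << j` is the
-- Int shift (exact for j ≥ 0, true throughout the loop) and `bin(i).count('1')` is bitCount.
def solve (n : Int) (m : Int) (q : Int) (w : List Int) (v : List Int) (x : List Int) (l : Int) (r : Int) : Int :=
  (PySem.List.pyRange 1 ((2 : Int) ^ n.toNat) 1).foldl (fun ans i =>
    if (PySem.Int.bitCount i : Int) ≠ m then ans
    else
      let wv : Int × Int := (PySem.List.pyRange 0 n 1).foldl (fun wv j =>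
        if PySem.Int.band i ((1 : Int) <<< j) ≠ 0 then
          (wv.1 + PySem.List.pyGetD w j 0, wv.2 + PySem.List.pyGetD v j 0)
        else wv) (0, 0)
      (PySem.List.pyRange 0 m 1).foldl (fun ans j =>
        if PySem.List.pyGetD x j 0 ≥ wv.1 ∧ l ≤ j + 1 ∧ j + 1 ≤ r then
          max ans wv.2
        else ans) ans) 0

-- ===== PORT B =====
-- go(j, k, weight, value) from Source B
def goB (t : Int) (n : Int) (w : List Int) (v : List Int) (j : Int) (k : Int) (weight : Int) (value : Int) : Int :=
  if k = 0 then (if weight ≤ t then value else 0)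
  else if ¬ (0 < k ∧ k ≤ n - j) then 0
  else max (goB t n w v (j + 1) (k - 1) (weight + PySem.List.pyGetD w j 0) (value + PySem.List.pyGetD v j 0))
           (goB t n w v (j + 1) k weight value)
termination_by (n - j).toNat
decreasing_by all_goals omega

def solve_alt (n : Int) (m : Int) (q : Int) (w : List Int) (v : List Int) (x : List Int) (l : Int) (r : Int) : Int :=
  if m < 1 ∨ n < m then 0
  else
    let lo := max 0 (l - 1)
    let hi := min m r
    if hi ≤ lo then 0
    else
      -- max(x[lo:hi]); none = Python's ValueError on an empty slice, excluded by Pre_ here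
      match PySem.List.max? (PySem.List.slice x (some lo) (some hi)) (fun y => y) with
      | none => 0
      | some t => goB t n w v 0 m 0 0

-- ===== PRECONDITION & SPEC =====
-- exactly A's no-raise domain: n ≥ 0 (range(1, 2**n) needs an int) and, whenever a size-m
-- subset exists (1 ≤ m ≤ n), the indexing w[j], v[j] (j < n) and x[j] (j < m) must be in range.
def Pre_solve (n : Int) (m : Int) (q : Int) (w : List Int) (v : List Int) (x : List Int) (l : Int) (r : Int) : Prop :=
  0 ≤ n ∧ (1 ≤ m → m ≤ n → (n ≤ (w.length : Int) ∧ n ≤ (v.length : Int) ∧ m ≤ (x.length : Int)))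
instance (n : Int) (m : Int) (q : Int) (w : List Int) (v : List Int) (x : List Int) (l : Int) (r : Int) : Decidable (Pre_solve n m q w v x l r) := by unfold Pre_solve; infer_instance

def pvWitness_solve : Int × Int × Int × List Int × List Int × List Int × Int × Int := (2, 1, 0, [1, 2], [3, 4], [5], 1, 1)

def Spec_solve (n : Int) (m : Int) (q : Int) (w : List Int) (v : List Int) (x : List Int) (l : Int) (r : Int) (out : Int) : Prop := out = solve_alt n m q w v x l r
instance (n : Int) (m : Int) (q : Int) (w : List Int) (v : List Int) (x : List Int) (l : Int) (r : Int) (out : Int) : Decidable (Spec_solve n m q w v x l r out) := by unfold Spec_solve; infer_instance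

-- ===== CLAIM (what is proved, stated in full; the proofs are below) =====
def Claim_equal_solve : Prop := ∀ (n : Int) (m : Int) (q : Int) (w : List Int) (v : List Int) (x : List Int) (l : Int) (r : Int), Dom_solve n m q w v x l r → Pre_solve n m q w v x l r → Spec_solve n m q w v x l r (solve n m q w v x l r)

-- ===== LEMMAS AND PROOFS =====

-- weight/value of the subset encoded by mask i (LSB-first) over a list of (w, v) pairs
def swv : List (Int × Int) → Nat → Int × Int
  | [], _ => (0, 0)
  | p :: tl, i => (if i % 2 = 1 then ((swv tl (i / 2)).1 + p.1, (swv tl (i / 2)).2 + p.2) else swv tl (i / 2))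

-- candidate values: size-k subsets of ws within threshold t, offset by (wgt, val)
def cands (t : Int) (ws : List (Int × Int)) (k : Int) (wgt : Int) (val : Int) : List Int :=
  (List.range (2 ^ ws.length)).filterMap (fun (i : Nat) =>
    if (PySem.Int.bitCount (i : Int) : Int) = k ∧ wgt + (swv ws i).1 ≤ t then some (val + (swv ws i).2) else none)

def bigmax (l : List Int) : Int := l.foldl max 0

-- goB, restated structurally on the remaining item list
def goL (t : Int) (ws : List (Int × Int)) (k wgt val : Int) : Int :=
  if k = 0 then (if wgt ≤ t then val else 0)
  else if ¬ (0 < k ∧ k ≤ (ws.length : Int)) then 0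
  else match ws with
    | [] => 0
    | p :: tl => max (goL t tl (k - 1) (wgt + p.1) (val + p.2)) (goL t tl k wgt val)

theorem goL_zero (t : Int) (ws : List (Int × Int)) (wgt val : Int) :
    goL t ws 0 wgt val = if wgt ≤ t then val else 0 := by
  rw [goL.eq_def]
  simp

theorem goL_prune (t : Int) (ws : List (Int × Int)) (k wgt val : Int) (hk : k ≠ 0)
    (h : ¬ (0 < k ∧ k ≤ (ws.length : Int))) : goL t ws k wgt val = 0 := by
  rw [goL.eq_def, if_neg hk, if_pos h]

theorem goL_cons (t : Int) (p : Int × Int) (tl : List (Int × Int)) (k wgt val : Int)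
    (hk : k ≠ 0) (hp : 0 < k ∧ k ≤ (tl.length : Int) + 1) :
    goL t (p :: tl) k wgt val
      = max (goL t tl (k - 1) (wgt + p.1) (val + p.2)) (goL t tl k wgt val) := by
  rw [goL.eq_def, if_neg hk, if_neg (not_not.mpr (by simpa using hp))]

theorem foldl_if_max {α : Type} (L : List α) (c : α → Prop) [DecidablePred c] (g : α → Int) (a : Int) :
    L.foldl (fun acc i => if c i then max acc (g i) else acc) a
      = (L.filterMap (fun i => if c i then some (g i) else none)).foldl max a := by
  induction L generalizing a with
  | nil => rfl
  | cons y tl ih =>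
    simp only [List.foldl_cons, List.filterMap_cons]
    by_cases h : c y <;> simp [h, ih]

theorem bitCount_cast_zero_iff (k : Nat) : PySem.Int.bitCount (k : Int) = 0 ↔ k = 0 := by
  induction k using Nat.strong_induction_on with
  | _ k ih =>
    rcases Nat.eq_zero_or_pos k with h | h
    · subst h; simp
    · rw [PySem.Int.bitCount_natCast h]
      constructor
      · intro he
        have h2 : k / 2 = 0 := (ih (k / 2) (by omega)).mp (by omega)
        omega
      · omega

theorem bitCount_le_of_lt_pow (s k : Nat) (h : k < 2 ^ s) : PySem.Int.bitCount (k : Int) ≤ s := by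
  induction s generalizing k with
  | zero => interval_cases k; simp
  | succ s ih =>
    rcases Nat.eq_zero_or_pos k with h0 | h0
    · subst h0; simp
    · rw [PySem.Int.bitCount_natCast h0]
      have := ih (k := k / 2) (by omega)
      omega



theorem foldl_max_init (l : List Int) (a b : Int) :
    l.foldl max (max a b) = max a (l.foldl max b) := by
  induction l generalizing b with
  | nil => simp
  | cons y tl ih => simp only [List.foldl_cons, max_assoc, ih]

theorem bigmax_nonneg (l : List Int) : 0 ≤ bigmax l := by
  have h := foldl_max_init l 0 0
  rw [max_self] at h
  rw [bigmax, h]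
  exact le_max_left _ _

theorem bigmax_append (l₁ l₂ : List Int) : bigmax (l₁ ++ l₂) = max (bigmax l₁) (bigmax l₂) := by
  simp only [bigmax, List.foldl_append]
  have h1 : List.foldl max 0 l₁ = max (List.foldl max 0 l₁) 0 :=
    (max_eq_left (bigmax_nonneg l₁)).symm
  rw [h1, foldl_max_init]
  rw [← h1]

theorem bigmax_perm {l₁ l₂ : List Int} (h : l₁.Perm l₂) : bigmax l₁ = bigmax l₂ :=
  List.Perm.foldl_op_eq h

theorem range_two_mul_perm (n : Nat) :
    (List.range (2 * n)).Perm
      ((List.range n).map (fun i => 2 * i + 1) ++ (List.range n).map (fun i => 2 * i)) := by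
  induction n with
  | zero => simp
  | succ n ih =>
    have h1 : 2 * (n + 1) = (2 * n + 1) + 1 := by ring
    rw [h1, List.range_succ, List.range_succ, List.range_succ]
    simp only [List.map_append, List.map_cons, List.map_nil]
    have hmid : ((List.range n).map (fun i => 2*i) ++ [2*n] ++ [2*n+1]).Perm
        ([2*n+1] ++ ((List.range n).map (fun i => 2*i) ++ [2*n])) := by
      exact List.perm_append_comm
    have s2 := ih.append_right ([2*n] ++ [2*n+1])
    have s3 := List.Perm.append_left ((List.range n).map (fun i => 2*i+1)) hmid
    have t1 : (List.range (2*n) ++ [2*n] ++ [2*n+1]).Perm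
        ((List.range n).map (fun i => 2*i+1) ++ ((List.range n).map (fun i => 2*i) ++ [2*n] ++ [2*n+1])) := by
      simpa [List.append_assoc] using s2
    have t2 := s3
    simp only [List.append_assoc] at t1 t2 ⊢
    exact t1.trans t2

theorem swv_zero (ws : List (Int × Int)) : swv ws 0 = (0, 0) := by
  induction ws with
  | nil => rfl
  | cons p tl ih => simp [swv, ih]

theorem swv_odd (p : Int × Int) (tl : List (Int × Int)) (i : Nat) :
    swv (p :: tl) (2 * i + 1) = ((swv tl i).1 + p.1, (swv tl i).2 + p.2) := by
  have h1 : (2 * i + 1) % 2 = 1 := by omega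
  have h2 : (2 * i + 1) / 2 = i := by omega
  simp [swv, h1, h2]

theorem swv_even (p : Int × Int) (tl : List (Int × Int)) (i : Nat) :
    swv (p :: tl) (2 * i) = swv tl i := by
  have h1 : (2 * i) % 2 = 0 := by omega
  have h2 : (2 * i) / 2 = i := by omega
  simp [swv, h1, h2]

theorem bc_odd (i : Nat) :
    PySem.Int.bitCount ((2 * i + 1 : Nat) : Int) = PySem.Int.bitCount (i : Int) + 1 := by
  rw [PySem.Int.bitCount_natCast (by omega : 0 < 2 * i + 1)]
  have h2 : (2 * i + 1) / 2 = i := by omega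
  rw [h2]
  omega

theorem bc_even (i : Nat) :
    PySem.Int.bitCount ((2 * i : Nat) : Int) = PySem.Int.bitCount (i : Int) := by
  rcases Nat.eq_zero_or_pos i with h | h
  · subst h; simp
  · rw [PySem.Int.bitCount_natCast (by omega : 0 < 2 * i)]
    have h2 : (2 * i) / 2 = i := by omega
    rw [h2]
    omega

theorem cands_nil_of_gt (t : Int) (ws : List (Int × Int)) (k wgt val : Int)
    (h : (ws.length : Int) < k) : cands t ws k wgt val = [] := by
  rw [cands, List.filterMap_eq_nil_iff]
  intro i hi
  rw [List.mem_range] at hi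
  have hb := bitCount_le_of_lt_pow ws.length i hi
  rw [if_neg]
  rintro ⟨hc, -⟩
  omega

theorem cands_nil_of_neg (t : Int) (ws : List (Int × Int)) (k wgt val : Int)
    (h : k < 0) : cands t ws k wgt val = [] := by
  rw [cands, List.filterMap_eq_nil_iff]
  intro i hi
  rw [if_neg]
  rintro ⟨hc, -⟩
  have : (0 : Int) ≤ (PySem.Int.bitCount (i : Int) : Int) := by positivity
  omega

theorem cands_cons_perm (t : Int) (p : Int × Int) (tl : List (Int × Int)) (k wgt val : Int) :
    (cands t (p :: tl) k wgt val).Perm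
      (cands t tl (k - 1) (wgt + p.1) (val + p.2) ++ cands t tl k wgt val) := by
  rw [cands, List.length_cons, pow_succ, mul_comm]
  have hperm := (range_two_mul_perm (2 ^ tl.length)).filterMap
    (fun (i : Nat) =>
      if (PySem.Int.bitCount (i : Int) : Int) = k ∧ wgt + (swv (p :: tl) i).1 ≤ t then
        some (val + (swv (p :: tl) i).2) else none)
  refine hperm.trans ?_
  rw [List.filterMap_append, List.filterMap_map, List.filterMap_map]
  apply List.Perm.of_eq
  congr 1
  · rw [cands]
    apply List.filterMap_congr
    intro i _
    simp only [Function.comp_apply, swv_odd, bc_odd]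
    by_cases hc : (PySem.Int.bitCount (i : Int) : Int) = k - 1 ∧ (wgt + p.1) + (swv tl i).1 ≤ t
    · rw [if_pos (by push_cast; constructor <;> [omega; linarith [hc.2]]), if_pos hc]
      congr 1
      ring
    · rw [if_neg, if_neg hc]
      rintro ⟨h1, h2⟩
      apply hc
      constructor
      · push_cast at h1 ⊢; omega
      · linarith
  · rw [cands]
    apply List.filterMap_congr
    intro i _
    simp only [Function.comp_apply, swv_even, bc_even]

theorem bigmax_cands_zero (t : Int) (ws : List (Int × Int)) (wgt val : Int) :
    bigmax (cands t ws 0 wgt val) = if wgt ≤ t then max 0 val else 0 := by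
  induction ws generalizing wgt val with
  | nil =>
    rw [cands]
    simp only [List.length_nil, pow_zero, List.range_one, List.filterMap_cons, List.filterMap_nil]
    rw [swv_zero]
    simp only [Nat.cast_zero, PySem.Int.bitCount_zero, Nat.cast_zero, add_zero, true_and]
    split_ifs <;> simp [bigmax]
  | cons p tl ih =>
    rw [bigmax_perm (cands_cons_perm t p tl 0 wgt val), bigmax_append,
        cands_nil_of_neg t tl (0 - 1) (wgt + p.1) (val + p.2) (by omega), ih]
    simp only [bigmax, List.foldl_nil]
    rw [max_eq_right]
    split_ifs
    · exact le_max_left 0 val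
    · exact le_refl 0

theorem goL_eq_bigmax (t : Int) (ws : List (Int × Int)) (k wgt val : Int) (hk : 1 ≤ k) :
    goL t ws k wgt val = bigmax (cands t ws k wgt val) := by
  induction ws generalizing k wgt val with
  | nil =>
    rw [goL_prune t [] k wgt val (by omega) (by rintro ⟨h1, h2⟩; simp at h2; omega)]
    rw [cands]
    simp only [List.length_nil, pow_zero, List.range_one, List.filterMap_cons, List.filterMap_nil]
    rw [if_neg (by rintro ⟨hc, -⟩; simp at hc; omega)]
    simp [bigmax]
  | cons p tl ih =>
    by_cases hp : k ≤ ((p :: tl).length : Int)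
    · rw [goL_cons t p tl k wgt val (by omega) ⟨by omega, by simpa using hp⟩]
      rw [bigmax_perm (cands_cons_perm t p tl k wgt val), bigmax_append]
      rcases eq_or_lt_of_le hk with h1 | h2
      · obtain rfl : k = 1 := h1.symm
        rw [show (1 : Int) - 1 = 0 by norm_num, goL_zero, bigmax_cands_zero, ih 1 _ _ le_rfl]
        have hB := bigmax_nonneg (cands t tl 1 wgt val)
        split_ifs with hc
        · conv_rhs => rw [max_assoc]
          rw [max_eq_right (le_trans hB (le_max_right _ _))]
        · rfl
      · rw [ih (k - 1) _ _ (by omega), ih k _ _ hk]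
    · rw [goL_prune t _ k wgt val (by omega) (by rintro ⟨h1, h2⟩; omega)]
      rw [cands_nil_of_gt t _ k wgt val (by omega)]
      rfl

theorem goB_eq_goL (t n : Int) (w v : List Int) (hn : 0 ≤ n)
    (hw : n ≤ (w.length : Int)) (hv : n ≤ (v.length : Int)) :
    ∀ (j : Nat), j ≤ n.toNat → ∀ (k wgt val : Int),
      goB t n w v (j : Int) k wgt val
        = goL t (((w.take n.toNat).zip (v.take n.toNat)).drop j) k wgt val := by
  have hlen : ((w.take n.toNat).zip (v.take n.toNat)).length = n.toNat := by
    rw [List.length_zip, List.length_take, List.length_take]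
    omega
  suffices H : ∀ (fuel : Nat) (j : Nat), n.toNat - j ≤ fuel → j ≤ n.toNat → ∀ (k wgt val : Int),
      goB t n w v (j : Int) k wgt val
        = goL t (((w.take n.toNat).zip (v.take n.toNat)).drop j) k wgt val by
    intro j hj k wgt val
    exact H (n.toNat - j) j le_rfl hj k wgt val
  intro fuel
  induction fuel with
  | zero =>
    intro j hf hj k wgt val
    have hd : (((w.take n.toNat).zip (v.take n.toNat)).drop j).length = 0 := by
      rw [List.length_drop, hlen]; omega
    rw [goB]
    by_cases hk : k = 0
    · rw [if_pos hk, hk, goL_zero]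
    · rw [if_neg hk, goL_prune t _ k wgt val hk (by rw [hd]; rintro ⟨h1, h2⟩; simp at h2; omega),
          if_pos (by rintro ⟨h1, h2⟩; omega)]
  | succ fuel ih =>
    intro j hf hj k wgt val
    by_cases hjn : j = n.toNat
    · have hd : (((w.take n.toNat).zip (v.take n.toNat)).drop j).length = 0 := by
        rw [List.length_drop, hlen]; omega
      rw [goB]
      by_cases hk : k = 0
      · rw [if_pos hk, hk, goL_zero]
      · rw [if_neg hk, goL_prune t _ k wgt val hk (by rw [hd]; rintro ⟨h1, h2⟩; simp at h2; omega),
            if_pos (by rintro ⟨h1, h2⟩; omega)]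
    · have hjlt : j < n.toNat := by omega
      have hjw : j < w.length := by omega
      have hjv : j < v.length := by omega
      have hjz : j < ((w.take n.toNat).zip (v.take n.toNat)).length := by omega
      have hdrop : ((w.take n.toNat).zip (v.take n.toNat)).drop j
          = ((w.take n.toNat).zip (v.take n.toNat))[j] :: ((w.take n.toNat).zip (v.take n.toNat)).drop (j + 1) :=
        List.drop_eq_getElem_cons hjz
      have hget : ((w.take n.toNat).zip (v.take n.toNat))[j] = (w[j], v[j]) := by
        rw [List.getElem_zip, List.getElem_take, List.getElem_take]
      have hgw : PySem.List.pyGetD w (j : Int) 0 = w[j] := by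
        rw [PySem.List.pyGetD_natCast, List.getD_eq_getElem?_getD, List.getElem?_eq_getElem hjw,
            Option.getD_some]
      have hgv : PySem.List.pyGetD v (j : Int) 0 = v[j] := by
        rw [PySem.List.pyGetD_natCast, List.getD_eq_getElem?_getD, List.getElem?_eq_getElem hjv,
            Option.getD_some]
      have hdl : ((((w.take n.toNat).zip (v.take n.toNat)).drop (j + 1)).length : Int) = n - j - 1 := by
        rw [List.length_drop, hlen]; omega
      rw [goB]
      by_cases hk : k = 0
      · rw [if_pos hk, hk, goL_zero]
      · rw [if_neg hk]
        by_cases hp : 0 < k ∧ k ≤ n - (j : Int)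
        · rw [if_neg (not_not.mpr hp), hdrop,
              goL_cons t _ _ k wgt val hk ⟨hp.1, by rw [hdl]; omega⟩, hget]
          have hcast : ((j : Int) + 1) = ((j + 1 : Nat) : Int) := by push_cast; ring
          rw [hgw, hgv, hcast, ih (j + 1) (by omega) (by omega) (k - 1) (wgt + w[j]) (val + v[j]),
              ih (j + 1) (by omega) (by omega) k wgt val]
        · rw [if_pos hp,
              goL_prune t _ k wgt val hk (by rw [List.length_drop, hlen]; rintro ⟨h1, h2⟩; exact hp ⟨h1, by omega⟩)]

theorem foldl_max_if_exists {α : Type} (L : List α) (c : α → Prop) [DecidablePred c]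
    (value : Int) (a : Int) :
    L.foldl (fun acc j => if c j then max acc value else acc) a
      = if ∃ j ∈ L, c j then max a value else a := by
  induction L generalizing a with
  | nil => simp
  | cons y tl ih =>
    simp only [List.foldl_cons]
    by_cases h : c y
    · rw [if_pos h, ih, if_pos (⟨y, by simp [h]⟩ : ∃ j ∈ y :: tl, c j)]
      split_ifs
      · rw [max_assoc, max_self]
      · rfl
    · rw [if_neg h, ih]
      have he : (∃ j ∈ y :: tl, c j) ↔ ∃ j ∈ tl, c j := by simp [h]
      simp only [he]

theorem band_pow_ne (i j : Nat) :
    (PySem.Int.band (i : Int) ((1 : Int) <<< (j : Int)) ≠ 0) ↔ (i >>> j) % 2 = 1 := by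
  rw [show (1 : Int) <<< (j : Int) = ((1 <<< j : Nat) : Int) by
    rw [Int.shiftLeft_natCast_right]
    exact_mod_cast (Int.natCast_shiftLeft 1 j).symm]
  rw [PySem.Int.band_natCast, Nat.one_shiftLeft, Nat.and_two_pow]
  rw [Nat.shiftRight_eq_div_pow]
  constructor
  · intro h
    have ht : i.testBit j = true := by
      by_contra hf
      simp only [Bool.not_eq_true] at hf
      rw [hf] at h
      simp at h
    rw [Nat.testBit_eq_decide_div_mod_eq] at ht
    simpa using ht
  · intro h
    have ht : i.testBit j = true := by
      rw [Nat.testBit_eq_decide_div_mod_eq]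
      simpa using h
    rw [ht]
    simp

theorem pairfold_eq (n : Int) (w v : List Int) (hn : 0 ≤ n)
    (hw : n ≤ (w.length : Int)) (hv : n ≤ (v.length : Int)) (i : Nat) :
    ∀ (j0 : Nat), j0 ≤ n.toNat → ∀ (acc : Int × Int),
      (PySem.List.pyRange (j0 : Int) n 1).foldl (fun wv j =>
          if PySem.Int.band (i : Int) ((1 : Int) <<< j) ≠ 0 then
            (wv.1 + PySem.List.pyGetD w j 0, wv.2 + PySem.List.pyGetD v j 0)
          else wv) acc
        = (acc.1 + (swv (((w.take n.toNat).zip (v.take n.toNat)).drop j0) (i >>> j0)).1,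
           acc.2 + (swv (((w.take n.toNat).zip (v.take n.toNat)).drop j0) (i >>> j0)).2) := by
  have hlen : ((w.take n.toNat).zip (v.take n.toNat)).length = n.toNat := by
    rw [List.length_zip, List.length_take, List.length_take]
    omega
  suffices H : ∀ (fuel : Nat) (j0 : Nat), n.toNat - j0 ≤ fuel → j0 ≤ n.toNat → ∀ (acc : Int × Int),
      (PySem.List.pyRange (j0 : Int) n 1).foldl (fun wv j =>
          if PySem.Int.band (i : Int) ((1 : Int) <<< j) ≠ 0 then
            (wv.1 + PySem.List.pyGetD w j 0, wv.2 + PySem.List.pyGetD v j 0)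
          else wv) acc
        = (acc.1 + (swv (((w.take n.toNat).zip (v.take n.toNat)).drop j0) (i >>> j0)).1,
           acc.2 + (swv (((w.take n.toNat).zip (v.take n.toNat)).drop j0) (i >>> j0)).2) by
    intro j0 hj0 acc
    exact H (n.toNat - j0) j0 le_rfl hj0 acc
  intro fuel
  induction fuel with
  | zero =>
    intro j0 hf hj0 acc
    have hj0' : (n : Int) ≤ (j0 : Int) := by omega
    rw [PySem.List.pyRange_one_eq_nil hj0']
    have hd : ((w.take n.toNat).zip (v.take n.toNat)).drop j0 = [] := by
      apply List.eq_nil_of_length_eq_zero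
      rw [List.length_drop, hlen]
      omega
    rw [hd]
    simp [swv]
  | succ fuel ih =>
    intro j0 hf hj0 acc
    by_cases hjn : j0 = n.toNat
    · have hj0' : (n : Int) ≤ (j0 : Int) := by omega
      rw [PySem.List.pyRange_one_eq_nil hj0']
      have hd : ((w.take n.toNat).zip (v.take n.toNat)).drop j0 = [] := by
        apply List.eq_nil_of_length_eq_zero
        rw [List.length_drop, hlen]
        omega
      rw [hd]
      simp [swv]
    · have hjlt : j0 < n.toNat := by omega
      have hjw : j0 < w.length := by omega
      have hjv : j0 < v.length := by omega
      have hjz : j0 < ((w.take n.toNat).zip (v.take n.toNat)).length := by omega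
      have hdrop : ((w.take n.toNat).zip (v.take n.toNat)).drop j0
          = ((w.take n.toNat).zip (v.take n.toNat))[j0] :: ((w.take n.toNat).zip (v.take n.toNat)).drop (j0 + 1) :=
        List.drop_eq_getElem_cons hjz
      have hget : ((w.take n.toNat).zip (v.take n.toNat))[j0] = (w[j0], v[j0]) := by
        rw [List.getElem_zip, List.getElem_take, List.getElem_take]
      have hgw : PySem.List.pyGetD w (j0 : Int) 0 = w[j0] := by
        rw [PySem.List.pyGetD_natCast, List.getD_eq_getElem?_getD, List.getElem?_eq_getElem hjw,
            Option.getD_some]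
      have hgv : PySem.List.pyGetD v (j0 : Int) 0 = v[j0] := by
        rw [PySem.List.pyGetD_natCast, List.getD_eq_getElem?_getD, List.getElem?_eq_getElem hjv,
            Option.getD_some]
      rw [PySem.List.pyRange_one_cons (by omega : (j0 : Int) < n)]
      rw [List.foldl_cons]
      have hcast : ((j0 : Int) + 1) = ((j0 + 1 : Nat) : Int) := by push_cast; ring
      rw [hdrop, hget]
      have hsh : i >>> (j0 + 1) = (i >>> j0) / 2 := Nat.shiftRight_succ i j0
      by_cases hb : PySem.Int.band (i : Int) ((1 : Int) <<< ((j0 : Nat) : Int)) ≠ 0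
      · rw [if_pos hb, hgw, hgv, hcast, ih (j0 + 1) (by omega) (by omega) _]
        have hbit : (i >>> j0) % 2 = 1 := (band_pow_ne i j0).mp hb
        rw [swv, if_pos hbit, ← hsh]
        simp only [Prod.mk.injEq]
        constructor <;> ring
      · rw [if_neg hb, hcast, ih (j0 + 1) (by omega) (by omega) acc]
        have hbit : ¬ ((i >>> j0) % 2 = 1) := fun hc => hb ((band_pow_ne i j0).mpr hc)
        rw [swv, if_neg hbit, ← hsh]

theorem foldl_id {α β : Type} (L : List α) (f : β → α → β) (a : β)
    (h : ∀ i ∈ L, ∀ b, f b i = b) : L.foldl f a = a := by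
  induction L generalizing a with
  | nil => rfl
  | cons y tl ih =>
    rw [List.foldl_cons, h y (by simp) a]
    exact ih _ (fun i hi b => h i (by simp [hi]) b)

theorem inner_loop_eq (x : List Int) (m l r t : Int)
    (hm : 1 ≤ m) (hx : m ≤ (x.length : Int)) (hwin : max 0 (l - 1) < min m r)
    (ht : PySem.List.max? (PySem.List.slice x (some (max 0 (l - 1))) (some (min m r))) (fun y => y) = some t)
    (weight value ans : Int) :
    (PySem.List.pyRange 0 m 1).foldl (fun ans j =>
        if PySem.List.pyGetD x j 0 ≥ weight ∧ l ≤ j + 1 ∧ j + 1 ≤ r then max ans value else ans) ans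
      = if weight ≤ t then max ans value else ans := by
  have h0lo : (0 : Int) ≤ max 0 (l - 1) := le_max_left 0 _
  have h0hi : (0 : Int) ≤ min m r := le_of_lt (lt_of_le_of_lt h0lo hwin)
  have hhix : min m r ≤ (x.length : Int) := le_trans (min_le_left m r) hx
  have hslice : PySem.List.slice x (some (max 0 (l - 1))) (some (min m r))
      = (x.drop (max 0 (l - 1)).toNat).take ((min m r).toNat - (max 0 (l - 1)).toNat) :=
    PySem.List.slice_toNat x h0lo h0hi
  rw [foldl_max_if_exists]
  have key : (∃ j ∈ PySem.List.pyRange 0 m 1,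
      PySem.List.pyGetD x j 0 ≥ weight ∧ l ≤ j + 1 ∧ j + 1 ≤ r) ↔ weight ≤ t := by
    constructor
    · rintro ⟨j, hjmem, hge, h1, h2⟩
      rw [PySem.List.mem_pyRange_one] at hjmem
      have hjlo : max 0 (l - 1) ≤ j := max_le hjmem.1 (by omega)
      have hjhi : j < min m r := lt_min hjmem.2 (by omega)
      have hjx : j.toNat < x.length := by omega
      have hget : PySem.List.pyGetD x j 0 = x[j.toNat]'hjx := by
        conv_lhs => rw [show j = ((j.toNat : Nat) : Int) by omega]
        rw [PySem.List.pyGetD_natCast, List.getD_eq_getElem?_getD, List.getElem?_eq_getElem hjx,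
            Option.getD_some]
      have hmem : x[j.toNat] ∈ PySem.List.slice x (some (max 0 (l - 1))) (some (min m r)) := by
        rw [hslice]
        refine List.mem_iff_getElem.mpr ⟨j.toNat - (max 0 (l - 1)).toNat, ?_, ?_⟩
        · rw [List.length_take, List.length_drop]
          omega
        · rw [List.getElem_take, List.getElem_drop]
          congr 1
          omega
      have hle := PySem.List.max?_isMax ht x[j.toNat] hmem
      simp only at hle
      rw [hget] at hge
      omega
    · intro hwt
      have hmem := PySem.List.max?_mem ht
      rw [hslice] at hmem
      obtain ⟨k, hk, hkt⟩ := List.mem_iff_getElem.mp hmem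
      rw [List.length_take, List.length_drop] at hk
      have hxk : ((x.drop (max 0 (l - 1)).toNat).take ((min m r).toNat - (max 0 (l - 1)).toNat))[k]'(by rw [List.length_take, List.length_drop]; omega) = x[(max 0 (l - 1)).toNat + k]'(by omega) := by
        rw [List.getElem_take, List.getElem_drop]
      rw [hxk] at hkt
      refine ⟨max 0 (l - 1) + k, ?_, ?_, ?_, ?_⟩
      · rw [PySem.List.mem_pyRange_one]
        have : max 0 (l - 1) + (k : Int) < min m r := by omega
        constructor
        · omega
        · have := min_le_left m r; omega
      · have hget : PySem.List.pyGetD x (max 0 (l - 1) + (k : Int)) 0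
            = x[(max 0 (l - 1)).toNat + k]'(by omega) := by
          conv_lhs => rw [show max 0 (l - 1) + (k : Int) = (((max 0 (l - 1)).toNat + k : Nat) : Int) by omega]
          rw [PySem.List.pyGetD_natCast, List.getD_eq_getElem?_getD,
              List.getElem?_eq_getElem (by omega), Option.getD_some]
        rw [hget, hkt]
        exact hwt
      · have := le_max_right 0 (l - 1); omega
      · have h1 : max 0 (l - 1) + (k : Int) < min m r := by omega
        have := min_le_right m r; omega
  rw [if_congr key rfl rfl]

-- ===== VERDICT (by name: the statement is the Claim_ definition above) =====
theorem solve_spec : Claim_equal_solve := by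
  unfold Claim_equal_solve
  intro n m q w v x l r hdom hpre
  unfold Spec_solve
  obtain ⟨hn, hlen⟩ := hpre
  rw [solve, solve_alt]
  by_cases hm1 : m < 1 ∨ n < m
  · rw [if_pos hm1]
    apply foldl_id
    intro i hi b
    rw [PySem.List.mem_pyRange_one] at hi
    have hieq : i = ((i.toNat : Nat) : Int) := by omega
    rw [if_pos ?_]
    rw [hieq]
    rcases hm1 with h | h
    · have hbc := (bitCount_cast_zero_iff i.toNat).not.mpr (by omega)
      omega
    · have hilt : i.toNat < 2 ^ n.toNat := by
        have : ((2 : Int) ^ n.toNat) = ((2 ^ n.toNat : Nat) : Int) := by push_cast; ring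
        omega
      have hbc := bitCount_le_of_lt_pow n.toNat i.toNat hilt
      omega
  · have hm1' : 1 ≤ m ∧ m ≤ n := by omega
    obtain ⟨hwlen, hvlen, hxlen⟩ := hlen hm1'.1 hm1'.2
    rw [if_neg hm1]
    by_cases hwin : min m r ≤ max 0 (l - 1)
    · rw [if_pos hwin]
      apply foldl_id
      intro i hi b
      by_cases hbc : (PySem.Int.bitCount i : Int) ≠ m
      · rw [if_pos hbc]
      · rw [if_neg hbc]
        apply foldl_id
        intro j hj ans
        rw [PySem.List.mem_pyRange_one] at hj
        rw [if_neg ?_]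
        rintro ⟨hge, h1, h2⟩
        have hjlo : max 0 (l - 1) ≤ j := max_le hj.1 (by omega)
        have hjhi : j < min m r := lt_min hj.2 (by omega)
        omega
    · rw [if_neg hwin]
      have hwin' : max 0 (l - 1) < min m r := by omega
      have h0lo : (0 : Int) ≤ max 0 (l - 1) := le_max_left 0 _
      have h0hi : (0 : Int) ≤ min m r := by omega
      have hsne : PySem.List.slice x (some (max 0 (l - 1))) (some (min m r)) ≠ [] := by
        rw [PySem.List.slice_toNat x h0lo h0hi]
        intro hc
        have := congrArg List.length hc
        rw [List.length_take, List.length_drop, List.length_nil] at this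
        have hhix : min m r ≤ (x.length : Int) := le_trans (min_le_left m r) hxlen
        omega
      obtain ⟨t, ht⟩ : ∃ t, PySem.List.max? (PySem.List.slice x (some (max 0 (l - 1))) (some (min m r))) (fun y => y) = some t := by
        cases hopt : PySem.List.max? (PySem.List.slice x (some (max 0 (l - 1))) (some (min m r))) (fun y => y) with
        | none => exact absurd ((PySem.List.max?_eq_none_iff _ _).mp hopt) hsne
        | some t => exact ⟨t, rfl⟩
      rw [ht]
      show _ = goB t n w v 0 m 0 0
      -- B side down to bigmax of the candidate list
      have hB := goB_eq_goL t n w v hn hwlen hvlen 0 (by omega) m 0 0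
      simp only [Nat.cast_zero, List.drop_zero] at hB
      rw [hB, goL_eq_bigmax t _ m 0 0 hm1'.1]
      -- A side: rewrite the outer fold pointwise
      have hws : ((w.take n.toNat).zip (v.take n.toNat)).length = n.toNat := by
        rw [List.length_zip, List.length_take, List.length_take]
        omega
      have hcongr : ∀ (a : Int), ∀ i ∈ PySem.List.pyRange 1 ((2 : Int) ^ n.toNat) 1,
          (fun ans i =>
            if (PySem.Int.bitCount i : Int) ≠ m then ans
            else
              let wv : Int × Int := (PySem.List.pyRange 0 n 1).foldl (fun wv j =>
                if PySem.Int.band i ((1 : Int) <<< j) ≠ 0 then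
                  (wv.1 + PySem.List.pyGetD w j 0, wv.2 + PySem.List.pyGetD v j 0)
                else wv) (0, 0)
              (PySem.List.pyRange 0 m 1).foldl (fun ans j =>
                if PySem.List.pyGetD x j 0 ≥ wv.1 ∧ l ≤ j + 1 ∧ j + 1 ≤ r then
                  max ans wv.2
                else ans) ans) a i
          = (fun ans (i : Int) =>
              if (PySem.Int.bitCount i : Int) = m ∧
                  (swv ((w.take n.toNat).zip (v.take n.toNat)) i.toNat).1 ≤ t then
                max ans (swv ((w.take n.toNat).zip (v.take n.toNat)) i.toNat).2
              else ans) a i := by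
        intro a i hi
        rw [PySem.List.mem_pyRange_one] at hi
        simp only
        by_cases hbc : (PySem.Int.bitCount i : Int) ≠ m
        · rw [if_pos hbc, if_neg (by rintro ⟨h1, -⟩; exact hbc h1)]
        · rw [if_neg hbc]
          push Not at hbc
          have hieq : i = ((i.toNat : Nat) : Int) := by omega
          have hpf := pairfold_eq n w v hn hwlen hvlen i.toNat 0 (by omega) (0, 0)
          simp only [Nat.cast_zero, List.drop_zero, Nat.shiftRight_zero, zero_add,
            Prod.mk.eta] at hpf
          rw [hieq, hpf, inner_loop_eq x m l r t hm1'.1 hxlen hwin' ht _ _ a]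
          simp only [Int.toNat_natCast]
          rw [← hieq]
          by_cases hwt : (swv ((w.take n.toNat).zip (v.take n.toNat)) i.toNat).1 ≤ t
          · rw [if_pos hwt, if_pos ⟨hbc, hwt⟩]
          · rw [if_neg hwt, if_neg (by rintro ⟨-, h2⟩; exact hwt h2)]
      rw [List.foldl_ext _ _ 0 hcongr]
      have hpow : (0 : Int) < (2 : Int) ^ n.toNat := by positivity
      have hext : List.foldl (fun ans (i : Int) =>
            if (PySem.Int.bitCount i : Int) = m ∧
                (swv ((w.take n.toNat).zip (v.take n.toNat)) i.toNat).1 ≤ t then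
              max ans (swv ((w.take n.toNat).zip (v.take n.toNat)) i.toNat).2
            else ans) 0 (PySem.List.pyRange 0 ((2 : Int) ^ n.toNat) 1)
          = List.foldl (fun ans (i : Int) =>
            if (PySem.Int.bitCount i : Int) = m ∧
                (swv ((w.take n.toNat).zip (v.take n.toNat)) i.toNat).1 ≤ t then
              max ans (swv ((w.take n.toNat).zip (v.take n.toNat)) i.toNat).2
            else ans) 0 (PySem.List.pyRange 1 ((2 : Int) ^ n.toNat) 1) := by
        rw [PySem.List.pyRange_one_cons hpow, List.foldl_cons]
        congr 1
        rw [if_neg]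
        rintro ⟨h1, -⟩
        simp at h1
        omega
      rw [← hext]
      rw [show ((2 : Int) ^ n.toNat) = ((2 ^ n.toNat : Nat) : Int) by push_cast; ring]
      rw [PySem.List.pyRange_zero_nat, List.foldl_map]
      simp only [Int.toNat_natCast]
      rw [foldl_if_max (List.range (2 ^ n.toNat))
        (fun (i : Nat) => (PySem.Int.bitCount (i : Int) : Int) = m ∧
          (swv ((w.take n.toNat).zip (v.take n.toNat)) i).1 ≤ t)
        (fun (i : Nat) => (swv ((w.take n.toNat).zip (v.take n.toNat)) i).2) 0]
      rw [bigmax, cands, hws]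
      simp only [zero_add]
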